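-- pv_equiv track=rewrite | github.com/afshindini/Algorithm-Programming | Increasing_Subarray/increasing_subarray.py | count_long_subarray
-- ===== SOURCE A (Python) =====
-- from typing import Tuple
--
-- def count_long_subarray(arr: Tuple) -> int:
--     """
--     Input:  arr    | Python Tuple of positive integers
--     Output: count | number of longest increasing subarrays of A
--     """
--     count = 1
--     longest_length = 1
--     current_length = 1
--
--     arr_len = len(arr)
--     for i in range(1, arr_len):
--         if arr[i - 1] < arr[i]:
--             current_length += 1
--         else:
--             current_length = 1
--
--         if current_length > longest_length:
--             longest_length = current_length
--             count = 1
--         elif current_length == longest_length: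
--             count += 1
--     return count
-- ===== SOURCE B (Python) =====
-- def count_long_subarray(arr):
--     """
--     Input:  arr    | Python Tuple of positive integers
--     Output: count | number of longest increasing subarrays of A
--     """
--     runs = []
--     cur = 1
--     for prev, nxt in zip(arr, arr[1:]):
--         if prev < nxt:
--             cur += 1
--         else:
--             runs.append(cur)
--             cur = 1
--     runs.append(cur)
--     return runs.count(max(runs))
-- ===== Notes on version B (the rewrite author's own statement) =====
-- stated objective: alternative
-- what changed: Instead of tracking the running best length and a count that resets inside one scan, B collects the lengths of all maximal increasing runs (zip of adjacent pairs) and returns how many runs equal the maximum run length.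
import Mathlib
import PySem

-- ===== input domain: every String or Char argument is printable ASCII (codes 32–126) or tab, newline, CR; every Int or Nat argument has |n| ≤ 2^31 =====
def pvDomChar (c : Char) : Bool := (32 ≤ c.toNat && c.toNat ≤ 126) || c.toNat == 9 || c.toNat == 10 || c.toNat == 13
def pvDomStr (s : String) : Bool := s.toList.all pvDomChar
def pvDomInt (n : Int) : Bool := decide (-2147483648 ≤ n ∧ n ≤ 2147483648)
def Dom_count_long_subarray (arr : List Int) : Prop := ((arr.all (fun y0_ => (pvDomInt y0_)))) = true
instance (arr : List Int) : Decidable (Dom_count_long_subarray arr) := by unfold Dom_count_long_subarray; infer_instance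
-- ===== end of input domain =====

-- B replaces A's single scan with best-length/count bookkeeping by collecting the
-- lengths of all maximal increasing runs and counting occurrences of the maximum
-- (objective: alternative decomposition; same O(n) cost).

-- ===== PORT A =====
-- A's loop body: update current_length from arr[i-1] < arr[i], then the two comparisons with longest_length.
-- state = (count, longest_length, current_length)
def stepA (s : Int × Int × Int) (pq : Int × Int) : Int × Int × Int :=
  let cur := if pq.1 < pq.2 then s.2.2 + 1 else 1
  if s.2.1 < cur then (1, cur, cur)
  else if cur = s.2.1 then (s.1 + 1, s.2.1, cur)
  else (s.1, s.2.1, cur)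

def count_long_subarray (arr : List Int) : Int :=
  ((PySem.List.pyRange 1 (arr.length : Int) 1).foldl
    (fun s i => stepA s (PySem.List.pyGetD arr (i - 1) 0, PySem.List.pyGetD arr i 0))
    (1, 1, 1)).1

-- ===== PORT B =====
-- B's loop body over zip(arr, arr[1:]): extend the current run or close it.
-- state = (runs, cur)
def stepB (s : List Int × Int) (pq : Int × Int) : List Int × Int :=
  if pq.1 < pq.2 then (s.1, s.2 + 1) else (s.1 ++ [s.2], 1)

def count_long_subarray_alt (arr : List Int) : Int :=
  let st := (arr.zip (PySem.List.slice arr (some 1) none)).foldl stepB ([], 1)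
  let runs := st.1 ++ [st.2]
  match PySem.List.max? runs id with   -- max(runs); runs is never empty
  | some m => ((PySem.List.count runs m : Nat) : Int)
  | none => 0

-- ===== PRECONDITION & SPEC =====
def Spec_count_long_subarray (arr : List Int) (out : Int) : Prop := out = count_long_subarray_alt arr
instance (arr : List Int) (out : Int) : Decidable (Spec_count_long_subarray arr out) := by unfold Spec_count_long_subarray; infer_instance

-- ===== CLAIM (what is proved, stated in full; the proofs are below) =====
def Claim_equal_count_long_subarray : Prop := ∀ (arr : List Int), Dom_count_long_subarray arr → Spec_count_long_subarray arr (count_long_subarray arr)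

-- ===== LEMMAS AND PROOFS =====

-- M runs cur = the largest current_length value A has seen so far; C runs cur = A's count.
def Mv (runs : List Int) (cur : Int) : Int := (runs ++ [cur]).foldl max 1
def Cv (runs : List Int) (cur : Int) : Int := (((runs ++ [cur]).count (Mv runs cur) : Nat) : Int)

lemma Mv_eq (runs : List Int) (cur : Int) : Mv runs cur = max (runs.foldl max 1) cur := by
  simp [Mv, List.foldl_append]

lemma one_le_foldl_max (runs : List Int) : 1 ≤ runs.foldl max 1 :=
  (PySem.List.le_foldl_max runs 1).1

lemma mem_le_foldl_max {runs : List Int} {r : Int} (h : r ∈ runs) : r ≤ runs.foldl max 1 :=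
  (PySem.List.le_foldl_max runs 1).2 r h

-- the indexed pairs A reads are exactly zip(arr, arr[1:])
lemma map_idx_eq_zip (arr : List Int) :
    (PySem.List.pyRange 1 (arr.length : Int) 1).map
      (fun i => (PySem.List.pyGetD arr (i - 1) 0, PySem.List.pyGetD arr i 0))
      = arr.zip (arr.drop 1) := by
  rw [PySem.List.pyRange_one, List.map_map]
  apply List.ext_getElem
  · simp
  · intro k h1 h2
    simp only [List.getElem_map, List.getElem_range, Function.comp_apply, List.getElem_zip,
      List.getElem_drop]
    have hk : k + 1 < arr.length := by
      simp at h1; omega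
    have e1 : (1 : Int) + (k : Int) - 1 = ((k : Nat) : Int) := by omega
    have e2 : (1 : Int) + (k : Int) = (((k + 1 : Nat)) : Int) := by omega
    rw [e1, e2, PySem.List.pyGetD_natCast, PySem.List.pyGetD_natCast]
    have h3 : (1 : Nat) + k = k + 1 := by omega
    simp [List.getD_eq_getElem?_getD, List.getElem?_eq_getElem (by omega : k < arr.length),
      h3, List.getElem?_eq_getElem hk]

lemma step_eq (runs : List Int) (cur p q : Int) (_hr : ∀ r ∈ runs, 1 ≤ r) (hc : 1 ≤ cur) :
    stepA (Cv runs cur, Mv runs cur, cur) (p, q)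
      = (Cv (stepB (runs, cur) (p, q)).1 (stepB (runs, cur) (p, q)).2,
         Mv (stepB (runs, cur) (p, q)).1 (stepB (runs, cur) (p, q)).2,
         (stepB (runs, cur) (p, q)).2) := by
  have hF := one_le_foldl_max runs
  have hcurM : cur ≤ Mv runs cur := by rw [Mv_eq]; exact le_max_right _ _
  have hFM : runs.foldl max 1 ≤ Mv runs cur := by rw [Mv_eq]; exact le_max_left _ _
  have hch : Mv runs cur = runs.foldl max 1 ∨ Mv runs cur = cur := by
    rw [Mv_eq]; exact max_choice _ _
  by_cases hpq : p < q
  · -- run extends: cur' = cur + 1, runs unchanged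
    simp only [stepA, stepB, hpq, if_pos]
    by_cases h1 : Mv runs cur < cur + 1
    · -- new record
      have hM' : Mv runs (cur + 1) = cur + 1 := by
        rw [Mv_eq]; exact max_eq_right (by omega)
      have hcnt : (runs ++ [cur + 1]).count (cur + 1) = 1 := by
        rw [List.count_append]
        have : runs.count (cur + 1) = 0 := by
          rw [List.count_eq_zero]
          intro hmem
          have := mem_le_foldl_max hmem
          omega
        simp [this]
      simp only [if_pos h1, Cv, hM', hcnt]
      simp
    · by_cases h2 : cur + 1 = Mv runs cur
      · -- ties the record: count + 1
        have hM' : Mv runs (cur + 1) = Mv runs cur := by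
          rw [Mv_eq, max_eq_right (by omega : runs.foldl max 1 ≤ cur + 1)]
          exact h2
        have hcnt : (runs ++ [cur + 1]).count (Mv runs cur)
            = (runs ++ [cur]).count (Mv runs cur) + 1 := by
          rw [List.count_append, List.count_append]
          have hne : cur ≠ Mv runs cur := by omega
          simp [h2, hne]
        simp only [if_neg h1, if_pos h2, Cv, hM', hcnt]
        simp
      · -- below the record: count unchanged
        have hM' : Mv runs (cur + 1) = Mv runs cur := by
          rcases hch with hch | hch
          · rw [Mv_eq, max_eq_left (by omega : cur + 1 ≤ runs.foldl max 1)]; omega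
          · omega
        have hcnt : (runs ++ [cur + 1]).count (Mv runs cur)
            = (runs ++ [cur]).count (Mv runs cur) := by
          rw [List.count_append, List.count_append]
          have hne1 : cur + 1 ≠ Mv runs cur := h2
          have hne2 : cur ≠ Mv runs cur := by omega
          simp [hne1, hne2]
        simp only [if_neg h1, if_neg h2, Cv, hM', hcnt]
  · -- run closes: runs' = runs ++ [cur], cur' = 1
    simp only [stepA, stepB, hpq, if_false]
    have hnotlt : ¬ (Mv runs cur < 1) := by omega
    have hM' : Mv (runs ++ [cur]) 1 = Mv runs cur := by
      rw [Mv_eq, show (runs ++ [cur]).foldl max 1 = Mv runs cur from rfl]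
      exact max_eq_left (by omega)
    have hcnt : (runs ++ [cur] ++ [1]).count (Mv runs cur)
        = (runs ++ [cur]).count (Mv runs cur)
          + (if (1 : Int) = Mv runs cur then 1 else 0) := by
      rw [List.count_append]
      by_cases h1 : (1 : Int) = Mv runs cur
      · simp [← h1]
      · simp [h1]
    simp only [if_neg hnotlt, Cv, hM', hcnt]
    split_ifs with h1
    · simp
    · simp

lemma stepB_wf (ps : List (Int × Int)) : ∀ (runs : List Int) (cur : Int),
    (∀ r ∈ runs, 1 ≤ r) → 1 ≤ cur →
    (∀ r ∈ (ps.foldl stepB (runs, cur)).1, 1 ≤ r) ∧ 1 ≤ (ps.foldl stepB (runs, cur)).2 := by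
  induction ps with
  | nil => intro runs cur hr hc; exact ⟨hr, hc⟩
  | cons pq ps ih =>
    intro runs cur hr hc
    simp only [List.foldl_cons]
    rcases pq with ⟨p, q⟩
    by_cases hpq : p < q
    · simp only [stepB, if_pos hpq]
      exact ih runs (cur + 1) hr (by omega)
    · simp only [stepB, if_neg hpq]
      refine ih (runs ++ [cur]) 1 ?_ le_rfl
      intro r hrm
      rcases List.mem_append.mp hrm with h | h
      · exact hr r h
      · simp at h; omega

lemma loop_inv (ps : List (Int × Int)) : ∀ (runs : List Int) (cur : Int),
    (∀ r ∈ runs, 1 ≤ r) → 1 ≤ cur →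
    ps.foldl stepA (Cv runs cur, Mv runs cur, cur)
      = (Cv (ps.foldl stepB (runs, cur)).1 (ps.foldl stepB (runs, cur)).2,
         Mv (ps.foldl stepB (runs, cur)).1 (ps.foldl stepB (runs, cur)).2,
         (ps.foldl stepB (runs, cur)).2) := by
  induction ps with
  | nil => intro runs cur hr hc; rfl
  | cons pq ps ih =>
    intro runs cur hr hc
    rcases pq with ⟨p, q⟩
    simp only [List.foldl_cons]
    rw [step_eq runs cur p q hr hc]
    by_cases hpq : p < q
    · simp only [stepB, if_pos hpq]
      exact ih runs (cur + 1) hr (by omega)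
    · simp only [stepB, if_neg hpq]
      refine ih (runs ++ [cur]) 1 ?_ le_rfl
      intro r hrm
      rcases List.mem_append.mp hrm with h | h
      · exact hr r h
      · simp at h; omega

lemma max?_cons_cons (a b : Int) (l : List Int) :
    PySem.List.max? (a :: b :: l) id
      = PySem.List.max? ((if a < b then b else a) :: l) id := by
  simp only [PySem.List.max?, List.foldl_cons, id_eq, apply_ite]
  rfl

lemma max?_eq (l : List Int) : ∀ (r : Int),
    PySem.List.max? (r :: l) id = some (l.foldl max r) := by
  induction l with
  | nil => intro r; rfl
  | cons x l ih =>
    intro r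
    rw [max?_cons_cons, ih, List.foldl_cons]
    congr 1
    rcases lt_or_ge r x with h | h
    · rw [if_pos h, max_eq_right h.le]
    · rw [if_neg (not_lt.mpr h), max_eq_left h]

-- ===== VERDICT (by name: the statement is the Claim_ definition above) =====
theorem count_long_subarray_spec : Claim_equal_count_long_subarray := by
  intro arr _hdom
  unfold Spec_count_long_subarray
  show count_long_subarray arr = count_long_subarray_alt arr
  have hslice : PySem.List.slice arr (some 1) none = arr.drop 1 := by
    simpa using PySem.List.slice_from arr (show (0 : Int) ≤ 1 by norm_num)
  simp only [count_long_subarray, count_long_subarray_alt, hslice]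
  have hfm := List.foldl_map
    (f := fun i => (PySem.List.pyGetD arr (i - 1) 0, PySem.List.pyGetD arr i 0))
    (g := stepA) (l := PySem.List.pyRange 1 (arr.length : Int) 1)
    (init := ((1 : Int), (1 : Int), (1 : Int)))
  rw [map_idx_eq_zip] at hfm
  rw [← hfm]
  have hinit : ((1 : Int), (1 : Int), (1 : Int)) = (Cv [] 1, Mv [] 1, 1) := by decide
  rw [hinit, loop_inv (arr.zip (arr.drop 1)) [] 1 (by simp) le_rfl]
  obtain ⟨hwf1, hwf2⟩ := stepB_wf (arr.zip (arr.drop 1)) [] 1 (by simp) le_rfl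
  set st := (arr.zip (arr.drop 1)).foldl stepB ([], 1) with hst
  rcases hrs : st.1 ++ [st.2] with _ | ⟨r, rest⟩
  · exact absurd hrs (by simp)
  · have hr1 : 1 ≤ r := by
      have : r ∈ st.1 ++ [st.2] := by rw [hrs]; exact List.mem_cons_self
      rcases List.mem_append.mp this with h | h
      · exact hwf1 r h
      · simp at h; omega
    rw [max?_eq rest r]
    simp only [Cv, Mv, PySem.List.count, hrs, List.foldl_cons, max_eq_right hr1]
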